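-- pv_equiv track=rewrite | github.com/chanwooyang1/Algorithm | 프로그래머스/0/181881. 조건에 맞게 수열 변환하기 2/조건에 맞게 수열 변환하기 2.py | solution
-- ===== SOURCE A (Python) =====
-- def solution(arr):
--     answer = []
--     answer.append(arr)
--     pointer = 0
--     while True:
--         temp = answer[pointer].copy()
--         for idx, t in enumerate(temp):
--             if t >= 50 and t % 2 == 0:
--                 temp[idx] = t//2
--             elif t < 50 and t % 2 != 0:
--                 temp[idx] = t*2 + 1
--
--         if answer[pointer] == temp:
--             return pointer
--         else:
--             answer.append(temp)
--             pointer += 1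
-- ===== SOURCE B (Python) =====
-- def solution(arr):
--     def steps(t):
--         c = 0
--         while True:
--             if t >= 50 and t % 2 == 0:
--                 u = t // 2
--             elif t < 50 and t % 2 != 0:
--                 u = t * 2 + 1
--             else:
--                 u = t
--             if u == t:
--                 return c
--             t = u
--             c += 1
--     return max((steps(t) for t in arr), default=0)
-- ===== Notes on version B (the rewrite author's own statement) =====
-- stated objective: alternative
-- what changed: Replaces the per-round whole-array rewrite loop (building a history of arrays and comparing consecutive ones) with an independent per-element convergence-step count aggregated by max(..., default=0).
import Mathlib
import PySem

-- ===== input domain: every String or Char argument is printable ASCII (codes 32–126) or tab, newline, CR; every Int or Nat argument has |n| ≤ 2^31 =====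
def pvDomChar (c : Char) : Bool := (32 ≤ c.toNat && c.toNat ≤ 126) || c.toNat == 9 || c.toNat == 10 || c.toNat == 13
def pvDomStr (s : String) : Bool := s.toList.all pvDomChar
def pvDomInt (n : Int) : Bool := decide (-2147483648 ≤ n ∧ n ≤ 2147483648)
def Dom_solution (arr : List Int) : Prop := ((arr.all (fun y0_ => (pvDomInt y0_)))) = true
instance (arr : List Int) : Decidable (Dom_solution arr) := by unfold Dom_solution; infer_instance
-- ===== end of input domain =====

-- B replaces A's per-round whole-array rewrite loop with an independent per-element
-- convergence-step count aggregated by max (same asymptotic cost, different decomposition).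


-- ===== PORT A =====
-- A's 'while True' loop; the fuel argument only makes the recursion total in Lean
-- (whenever the Python loop terminates it reaches its fixpoint long before the fuel runs out;
-- on arrays with a negative odd element neither Python terminates, and nothing is claimed of a timeout).
-- A keeps a history list 'answer' but only ever reads its last entry, which is 'cur' here.
def solution_loop (fuel : Nat) (cur : List Int) (pointer : Int) : Int :=
  match fuel with
  | 0 => pointer
  | fuel + 1 =>
    let temp := cur.map (fun t =>
      if 50 ≤ t ∧ PySem.Int.mod t 2 = 0 then PySem.Int.floordiv t 2
      else if t < 50 ∧ ¬ PySem.Int.mod t 2 = 0 then t * 2 + 1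
      else t)
    if cur = temp then pointer else solution_loop fuel temp (pointer + 1)

def solution (arr : List Int) : Int := solution_loop 4294967396 arr 0

-- ===== PORT B =====
def transform (t : Int) : Int :=
  if 50 ≤ t ∧ PySem.Int.mod t 2 = 0 then PySem.Int.floordiv t 2
  else if t < 50 ∧ ¬ PySem.Int.mod t 2 = 0 then t * 2 + 1
  else t

-- B's inner 'while True' of steps(t); fuel only makes the recursion total in Lean.
def steps_loop (fuel : Nat) (t : Int) (c : Int) : Int :=
  match fuel with
  | 0 => c
  | fuel + 1 =>
    let u := transform t
    if u = t then c else steps_loop fuel u (c + 1)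

def solution_alt (arr : List Int) : Int :=
  (PySem.List.max? (arr.map (fun t => steps_loop 4294967396 t 0)) (fun y => y)).getD 0

-- ===== PRECONDITION & SPEC =====
def Spec_solution (arr : List Int) (out : Int) : Prop := out = solution_alt arr
instance (arr : List Int) (out : Int) : Decidable (Spec_solution arr out) := by unfold Spec_solution; infer_instance

-- ===== CLAIM (what is proved, stated in full; the proofs are below) =====
def Claim_equal_solution : Prop := ∀ (arr : List Int), Dom_solution arr → Spec_solution arr (solution arr)

-- ===== LEMMAS AND PROOFS =====

-- rounds taken by A's loop (as a Nat), and steps taken by B's per-element loop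
def cntL (fuel : Nat) (xs : List Int) : Nat :=
  match fuel with
  | 0 => 0
  | fuel + 1 => if xs = xs.map transform then 0 else cntL fuel (xs.map transform) + 1

def cntE (fuel : Nat) (t : Int) : Nat :=
  match fuel with
  | 0 => 0
  | fuel + 1 => if transform t = t then 0 else cntE fuel (transform t) + 1

theorem transform_lambda : (fun t : Int =>
    if 50 ≤ t ∧ PySem.Int.mod t 2 = 0 then PySem.Int.floordiv t 2
    else if t < 50 ∧ ¬ PySem.Int.mod t 2 = 0 then t * 2 + 1
    else t) = transform := rfl

theorem solution_loop_cnt : ∀ (fuel : Nat) (xs : List Int) (p : Int),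
    solution_loop fuel xs p = p + (cntL fuel xs : Int) := by
  intro fuel
  induction fuel with
  | zero => intro xs p; simp [solution_loop, cntL]
  | succ n ih =>
    intro xs p
    simp only [solution_loop, transform_lambda, cntL]
    split_ifs with h
    · simp
    · rw [ih]; push_cast; ring

theorem steps_loop_cnt : ∀ (fuel : Nat) (t : Int) (c : Int),
    steps_loop fuel t c = c + (cntE fuel t : Int) := by
  intro fuel
  induction fuel with
  | zero => intro t c; simp [steps_loop, cntE]
  | succ n ih =>
    intro t c
    simp only [steps_loop, cntE]
    split_ifs with h
    · simp
    · rw [ih]; push_cast; ring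

theorem cntE_zero_of_fix (fuel : Nat) (t : Int) (h : transform t = t) : cntE fuel t = 0 := by
  cases fuel <;> simp [cntE, h]

theorem map_fix (l : List Int) (f : Int → Int) (h : l = l.map f) : ∀ x ∈ l, f x = x := by
  induction l with
  | nil => intro x hx; exact absurd hx List.not_mem_nil
  | cons y t ih =>
    rw [List.map_cons] at h
    injection h with h1 h2
    intro x hx
    rcases List.mem_cons.mp hx with rfl | hx2
    · exact h1.symm
    · exact ih h2 x hx2

theorem fix_map (l : List Int) (f : Int → Int) (h : ∀ x ∈ l, f x = x) : l = l.map f := by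
  rw [List.map_congr_left h]; simp

theorem foldl_max_comm : ∀ (l : List Nat) (a : Nat),
    l.foldl Nat.max a = Nat.max a (l.foldl Nat.max 0) := by
  intro l
  induction l with
  | nil => intro a; simp
  | cons x t ih =>
    intro a
    simp only [List.foldl_cons]
    rw [ih (Nat.max a x), ih (Nat.max 0 x)]
    generalize List.foldl Nat.max 0 t = M
    show max (max a x) M = max a (max (max 0 x) M)
    omega

theorem foldl_max_zero (g : Int → Nat) (xs : List Int) (h : ∀ t ∈ xs, g t = 0) :
    (xs.map g).foldl Nat.max 0 = 0 := by
  induction xs with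
  | nil => simp
  | cons x t ih =>
    simp only [List.map_cons, List.foldl_cons]
    rw [foldl_max_comm, ih (fun s hs => h s (List.mem_cons_of_mem _ hs)),
      h x List.mem_cons_self]
    rfl

theorem foldl_max_shift (a : Int → Nat) (fixp : Int → Prop) [DecidablePred fixp] :
    ∀ (xs : List Int), (∀ t ∈ xs, fixp t → a t = 0) → (∃ t ∈ xs, ¬ fixp t) →
    (xs.map (fun t => if fixp t then 0 else a t + 1)).foldl Nat.max 0 =
      (xs.map a).foldl Nat.max 0 + 1 := by
  intro xs
  induction xs with
  | nil => rintro _ ⟨t, ht, _⟩; exact absurd ht (List.not_mem_nil)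
  | cons x t ih =>
    intro hz hex
    simp only [List.map_cons, List.foldl_cons]
    rw [foldl_max_comm, foldl_max_comm (t.map a)]
    by_cases hl : ∃ s ∈ t, ¬ fixp s
    · rw [ih (fun s hs => hz s (List.mem_cons_of_mem _ hs)) hl]
      by_cases hx : fixp x
      · rw [hz x List.mem_cons_self hx]; simp [hx]
      · simp [hx, Nat.succ_max_succ]
    · have hx : ¬ fixp x := by
        rcases hex with ⟨s, hs, hns⟩
        rcases List.mem_cons.mp hs with rfl | hs'
        · exact hns
        · exact absurd ⟨s, hs', hns⟩ hl
      push Not at hl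
      have h1 : (t.map (fun s => if fixp s then 0 else a s + 1)).foldl Nat.max 0 = 0 := by
        apply foldl_max_zero; intro s hs; simp [hl s hs]
      have h2 : (t.map a).foldl Nat.max 0 = 0 := by
        apply foldl_max_zero; intro s hs
        exact hz s (List.mem_cons_of_mem _ hs) (hl s hs)
      rw [h1, h2]; simp [hx]

theorem cntL_eq_max_cntE : ∀ (fuel : Nat) (xs : List Int),
    cntL fuel xs = (xs.map (cntE fuel)).foldl Nat.max 0 := by
  intro fuel
  induction fuel with
  | zero =>
    intro xs
    exact (foldl_max_zero (cntE 0) xs (fun t _ => rfl)).symm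
  | succ n ih =>
    intro xs
    simp only [cntL]
    split_ifs with h
    · have hfix : ∀ t ∈ xs, transform t = t := map_fix xs transform h
      symm
      apply foldl_max_zero
      intro t ht
      simp [cntE, hfix t ht]
    · rw [ih, List.map_map]
      have hex : ∃ t ∈ xs, ¬ transform t = t := by
        by_contra hc
        push Not at hc
        exact h (fix_map xs transform hc)
      have key := foldl_max_shift (fun t => cntE n (transform t)) (fun t => transform t = t)
        xs (fun t _ ht => by simp only []; rw [ht]; exact cntE_zero_of_fix n t ht) hex
      simp only [] at key
      have hcomp : xs.map (cntE n ∘ transform) = xs.map (fun t => cntE n (transform t)) := rfl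
      rw [hcomp, ← key]
      rfl

theorem cast_foldl_max : ∀ (l : List Nat) (a : Nat),
    ((l.foldl Nat.max a : Nat) : Int) = List.foldl max (a : Int) (l.map (fun n : Nat => (n : Int))) := by
  intro l
  induction l with
  | nil => intro a; simp
  | cons x t ih => intro a; simp only [List.map_cons, List.foldl_cons, ih]; norm_cast

theorem cntL_nil (fuel : Nat) : cntL fuel ([] : List Int) = 0 := by
  cases fuel <;> simp [cntL]

-- ===== VERDICT (by name: the statement is the Claim_ definition above) =====
theorem solution_spec : Claim_equal_solution := by
  intro arr _
  unfold Spec_solution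
  show solution arr = solution_alt arr
  unfold solution solution_alt
  rw [solution_loop_cnt]
  have hmap : ∀ (l : List Int),
      l.map (fun s => steps_loop 4294967396 s 0) =
        (l.map (cntE 4294967396)).map (fun n : Nat => (n : Int)) := by
    intro l
    rw [List.map_map]
    apply List.map_congr_left
    intro s _
    rw [steps_loop_cnt]
    simp [Function.comp]
  cases arr with
  | nil => simp [cntL_nil, PySem.List.max?]
  | cons x t =>
    rw [cntL_eq_max_cntE, hmap, List.map_cons, List.map_cons, PySem.List.max?_id_cons,
      List.foldl_cons]
    have h0 : Nat.max 0 (cntE 4294967396 x) = cntE 4294967396 x := by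
      show max 0 _ = _
      omega
    rw [h0, cast_foldl_max]
    simp
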